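-- pv_equiv track=rewrite | github.com/jacksontcollier/Advent_Code | day20/elves.py | first_n_house_presents
-- ===== SOURCE A (Python) =====
-- def first_n_house_presents(first_n_houses, max_presents_per_elf,
--                            present_multiplication_factor):
--     house_presents = [0]
--
--     for house in range(first_n_houses):
--         house_presents.append(0)
--
--     for elf in range(1, first_n_houses + 1):
--         house = elf
--         while house <= first_n_houses:
--             if (max_presents_per_elf != None
--                     and house / elf > max_presents_per_elf):
--                 break
--             house_presents[house] += elf * present_multiplication_factor
--             house += elf
--
--     return house_presents
-- ===== SOURCE B (Python) =====
-- def first_n_house_presents(first_n_houses, max_presents_per_elf,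
--                            present_multiplication_factor):
--     # Square-root divisor-pair sieve: only generators d with d*d <= house are
--     # enumerated; each visited house credits both members d and house//d of the
--     # divisor pair (a square root once), and the per-elf cap is a local test on
--     # the visit number house//elf instead of a loop cut-off.
--     def allowed(visit_number):
--         return max_presents_per_elf is None or visit_number <= max_presents_per_elf
--
--     house_presents = [0] + [0] * first_n_houses
--     d = 1
--     while d * d <= first_n_houses:
--         for house in range(d * d, first_n_houses + 1, d):
--             q = house // d
--             if allowed(q):
--                 house_presents[house] += d * present_multiplication_factor
--             if q != d and allowed(d):
--                 house_presents[house] += q * present_multiplication_factor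
--         d += 1
--     return house_presents
-- ===== Notes on version B (the rewrite author's own statement) =====
-- stated objective: alternative
-- what changed: Replaces A's elf-outer sieve (every elf walks all its multiples, breaking once its visit count exceeds the cap) with a square-root divisor-pair sieve: only generators d with d*d <= house run, each visited house is credited with both members d and house//d of the divisor pair (a square root once), and the cap becomes a local test on the visit number instead of a loop break.
import Mathlib
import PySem

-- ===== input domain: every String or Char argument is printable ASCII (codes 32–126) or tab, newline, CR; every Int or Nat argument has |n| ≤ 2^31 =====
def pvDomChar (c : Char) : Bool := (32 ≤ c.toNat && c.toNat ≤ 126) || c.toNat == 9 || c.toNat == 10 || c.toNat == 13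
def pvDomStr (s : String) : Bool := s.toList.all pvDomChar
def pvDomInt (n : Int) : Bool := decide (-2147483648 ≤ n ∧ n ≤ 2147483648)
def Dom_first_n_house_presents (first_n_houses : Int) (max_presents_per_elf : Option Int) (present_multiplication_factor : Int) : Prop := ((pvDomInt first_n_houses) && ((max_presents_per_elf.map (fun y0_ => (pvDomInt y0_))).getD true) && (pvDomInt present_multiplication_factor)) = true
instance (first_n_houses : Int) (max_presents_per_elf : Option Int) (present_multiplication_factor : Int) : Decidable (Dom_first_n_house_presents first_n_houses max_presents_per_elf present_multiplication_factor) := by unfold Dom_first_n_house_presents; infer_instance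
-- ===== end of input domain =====

-- B replaces A's elf-outer sieve (per-elf walk with a break at the cap) by a square-root
-- divisor-pair sieve: generators d with d*d <= house credit both d and house//d, the cap a
-- local test; same results, no speed claim.

-- ===== PORT A =====
-- Inner while loop of A. `fuel` only makes the recursion total: house grows by elf ≥ 1
-- every iteration, so fuel = first_n_houses.toNat + 1 is never exhausted before house > N.
-- Python compares `house / elf > max` with float division; house is always a multiple of
-- elf here (it starts at elf and steps by elf), so floor division is exact at this point.
def pvAInner (N : Int) (cap : Option Int) (f : Int) (elf : Int) :
    Nat → Int → List Int → List Int
  | 0, _, acc => acc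
  | fuel + 1, house, acc =>
    if house ≤ N then
      if (match cap with
          | some m => decide (m < PySem.Int.floordiv house elf)
          | none => false) then acc
      else
        pvAInner N cap f elf fuel (house + elf)
          (PySem.List.pySetD acc house (PySem.List.pyGetD acc house 0 + elf * f))
    else acc

def first_n_house_presents (first_n_houses : Int) (max_presents_per_elf : Option Int) (present_multiplication_factor : Int) : List Int :=
  (PySem.List.pyRange 1 (first_n_houses + 1) 1).foldl
    (fun acc elf => pvAInner first_n_houses max_presents_per_elf present_multiplication_factor
        elf (first_n_houses.toNat + 1) elf acc)
    ((PySem.List.pyRange 0 first_n_houses 1).foldl (fun acc _ => acc ++ [(0 : Int)]) [0])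

-- ===== PORT B =====
-- Source B's helper `allowed(visit_number)`
def pvAllowed (cap : Option Int) (v : Int) : Bool :=
  match cap with
  | none => true
  | some m => decide (v ≤ m)

-- body of Source B's inner for-loop: the two conditional in-place additions at `house` = m
def pvBStep (cap : Option Int) (f d : Int) (acc : List Int) (m : Int) : List Int :=
  let q := PySem.Int.floordiv m d
  let acc1 := if pvAllowed cap q
    then PySem.List.pySetD acc m (PySem.List.pyGetD acc m 0 + d * f) else acc
  if q ≠ d ∧ pvAllowed cap d
    then PySem.List.pySetD acc1 m (PySem.List.pyGetD acc1 m 0 + q * f) else acc1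

-- Source B's outer while loop `d = 1; while d * d <= first_n_houses: … d += 1`.
-- `fuel` only makes the recursion total: d increases by 1 each iteration and the loop
-- stops once d*d > first_n_houses, so fuel = first_n_houses.toNat + 1 never runs out first.
def pvBOuter (N : Int) (cap : Option Int) (f : Int) : Nat → Int → List Int → List Int
  | 0, _, acc => acc
  | fuel + 1, d, acc =>
    if d * d ≤ N then
      pvBOuter N cap f fuel (d + 1)
        ((PySem.List.pyRange (d * d) (N + 1) d).foldl (pvBStep cap f d) acc)
    else acc

def first_n_house_presents_alt (first_n_houses : Int) (max_presents_per_elf : Option Int) (present_multiplication_factor : Int) : List Int :=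
  pvBOuter first_n_houses max_presents_per_elf present_multiplication_factor
    (first_n_houses.toNat + 1) 1 ([0] ++ List.replicate first_n_houses.toNat 0)

-- ===== PRECONDITION & SPEC =====
def Spec_first_n_house_presents (first_n_houses : Int) (max_presents_per_elf : Option Int) (present_multiplication_factor : Int) (out : List Int) : Prop := out = first_n_house_presents_alt first_n_houses max_presents_per_elf present_multiplication_factor
instance (first_n_houses : Int) (max_presents_per_elf : Option Int) (present_multiplication_factor : Int) (out : List Int) : Decidable (Spec_first_n_house_presents first_n_houses max_presents_per_elf present_multiplication_factor out) := by unfold Spec_first_n_house_presents; infer_instance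

-- ===== CLAIM (what is proved, stated in full; the proofs are below) =====
def Claim_equal_first_n_house_presents : Prop := ∀ (first_n_houses : Int) (max_presents_per_elf : Option Int) (present_multiplication_factor : Int), Dom_first_n_house_presents first_n_houses max_presents_per_elf present_multiplication_factor → Spec_first_n_house_presents first_n_houses max_presents_per_elf present_multiplication_factor (first_n_house_presents first_n_houses max_presents_per_elf present_multiplication_factor)

-- ===== LEMMAS AND PROOFS =====

-- "an elf stepping by elf from lo deposits a present at house i" (A's inner loop)
def pvHit (N : Int) (cap : Option Int) (elf lo i : Int) : Bool :=
  decide (lo ≤ i) && decide (i ≤ N) && decide (i % elf = 0) && pvAllowed cap (i / elf)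

lemma pvGap {elf house i : Int} (helf : 1 ≤ elf) (h1 : house % elf = 0)
    (h2 : i % elf = 0) (h3 : house ≤ i) (h4 : i ≠ house) : house + elf ≤ i := by
  obtain ⟨k, hk⟩ : elf ∣ house := Int.dvd_of_emod_eq_zero h1
  obtain ⟨j, hj⟩ : elf ∣ i := Int.dvd_of_emod_eq_zero h2
  subst hk hj
  have hkj : k < j := by
    have hle : k ≤ j := le_of_mul_le_mul_left h3 (by omega)
    rcases lt_or_eq_of_le hle with h | h
    · exact h
    · exact absurd (by rw [h]) h4
  nlinarith

lemma pvAInner_length (N : Int) (cap : Option Int) (f elf : Int) :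
    ∀ (fuel : Nat) (house : Int) (acc : List Int),
      (pvAInner N cap f elf fuel house acc).length = acc.length := by
  intro fuel
  induction fuel with
  | zero => intro house acc; simp [pvAInner]
  | succ n ih =>
      intro house acc
      rcases cap with _ | m <;> simp only [pvAInner] <;> split_ifs <;>
        simp [ih, PySem.List.length_pySetD]

lemma pvGetD_set (xs : List Int) (n i : Nat) (v : Int) (hn : n < xs.length) :
    (xs.set n v).getD i 0 = if i = n then v else xs.getD i 0 := by
  unfold List.getD
  rcases eq_or_ne i n with rfl | hne
  · simp [hn]
  · simp [hne, Ne.symm hne]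

-- one loop step of the contribution indicator
lemma pvHit_step (N : Int) (cap : Option Int) (f elf house : Int) (helf : 1 ≤ elf)
    (hdvd : house % elf = 0) (hle : house ≤ N) (hcap : pvAllowed cap (house / elf) = true) (i : Nat) :
    (if pvHit N cap elf house i then elf * f else 0)
      = (if (i : Int) = house then elf * f else 0)
        + (if pvHit N cap elf (house + elf) i then elf * f else 0) := by
  by_cases hi : (i : Int) = house
  · have h1 : pvHit N cap elf house (i : Int) = true := by
      simp only [pvHit, Bool.and_eq_true, decide_eq_true_eq]
      exact ⟨⟨⟨by omega, by omega⟩, by rw [hi]; exact hdvd⟩, by rw [hi]; exact hcap⟩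
    have h2 : pvHit N cap elf (house + elf) (i : Int) = false := by
      simp only [pvHit]
      by_contra hcon
      simp only [Bool.not_eq_false, Bool.and_eq_true, decide_eq_true_eq] at hcon
      omega
    rw [h1, h2, hi]; simp
  · have heq : pvHit N cap elf house (i : Int) = pvHit N cap elf (house + elf) (i : Int) := by
      simp only [pvHit]
      by_cases hA : house ≤ (i : Int) ∧ (i : Int) % elf = 0
      · have hiff : (house ≤ (i : Int)) ↔ (house + elf ≤ (i : Int)) :=
          ⟨fun _ => pvGap helf hdvd hA.2 hA.1 hi, fun h => by omega⟩
        rw [decide_eq_decide.mpr hiff]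
      · rcases not_and_or.mp hA with h | h
        · have hf1 : decide (house ≤ (i : Int)) = false := by simp [h]
          have hf2 : decide (house + elf ≤ (i : Int)) = false := by
            simp only [decide_eq_false_iff_not]; omega
          rw [hf1, hf2]
        · have hf : decide ((i : Int) % elf = 0) = false := by simp [h]
          rw [hf]; simp
    rw [heq]; simp [hi]

-- unfolding one iteration of the while loop, with the break test phrased via pvAllowed
lemma pvAInner_succ (N : Int) (cap : Option Int) (f elf : Int) (fuel : Nat)
    (house : Int) (acc : List Int) :
    pvAInner N cap f elf (fuel + 1) house acc =
      if house ≤ N then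
        if pvAllowed cap (PySem.Int.floordiv house elf) then
          pvAInner N cap f elf fuel (house + elf)
            (PySem.List.pySetD acc house (PySem.List.pyGetD acc house 0 + elf * f))
        else acc
      else acc := by
  rcases cap with _ | m
  · simp [pvAInner, pvAllowed]
  · simp only [pvAInner, pvAllowed]
    by_cases h : PySem.Int.floordiv house elf ≤ m
    · simp [h, not_lt.mpr h]
    · simp [h, not_le.mp h]

-- the value of A's inner while loop at every index
lemma pvAInner_getD (N : Int) (cap : Option Int) (f elf : Int) (helf : 1 ≤ elf) :
    ∀ (fuel : Nat) (house : Int) (acc : List Int),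
      house % elf = 0 → 1 ≤ house → N < house + (fuel : Int) * elf → acc.length = N.toNat + 1 →
      ∀ (i : Nat),
        (pvAInner N cap f elf fuel house acc).getD i 0
          = acc.getD i 0 + (if pvHit N cap elf house i then elf * f else 0) := by
  intro fuel
  induction fuel with
  | zero =>
      intro house acc hdvd h1 hterm hlen i
      have hhit : pvHit N cap elf house (i : Int) = false := by
        simp only [pvHit]
        by_contra hcon
        simp only [Bool.not_eq_false, Bool.and_eq_true, decide_eq_true_eq] at hcon
        omega
      simp [pvAInner, hhit]
  | succ fuel ih =>
      intro house acc hdvd h1 hterm hlen i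
      rw [pvAInner_succ]
      have helf0 : (0 : Int) < elf := by omega
      have hfd : PySem.Int.floordiv house elf = house / elf :=
        PySem.Int.floordiv_eq_ediv_of_pos helf0
      rw [hfd]
      by_cases hle : house ≤ N
      · rw [if_pos hle]
        by_cases hcap : pvAllowed cap (house / elf) = true
        · -- no break: do the body and recurse
          rw [if_pos hcap]
          have hhouse0 : (0 : Int) ≤ house := by omega
          have hnlt : house.toNat < acc.length := by omega
          have hltI : house < (acc.length : Int) := by omega
          have hset : (PySem.List.pySetD acc house (PySem.List.pyGetD acc house 0 + elf * f))
              = acc.set house.toNat (acc.getD house.toNat 0 + elf * f) := by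
            rw [PySem.List.pySetD_of_nonneg acc (PySem.List.pyGetD acc house 0 + elf * f) hhouse0]
            congr 1
            rw [PySem.List.pyGetD_eq_getElem acc 0 hhouse0 hltI,
              List.getD_eq_getElem acc 0 hnlt]
          rw [hset]
          rw [ih (house + elf) _ (by simp [hdvd]) (by omega) (by push_cast at hterm ⊢; linarith)
            (by rw [List.length_set, hlen]) i]
          rw [pvGetD_set acc house.toNat i _ hnlt]
          rw [pvHit_step N cap f elf house helf hdvd hle hcap i]
          by_cases hieq : i = house.toNat
          · have hieq' : (i : Int) = house := by omega
            simp [hieq, hhouse0]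
            ring
          · have hieq' : ¬ ((i : Int) = house) := by omega
            simp [hieq, hieq']
        · -- break: the cap test fails already at this house, nothing more is added
          rw [if_neg hcap]
          rcases cap with _ | m
          · simp [pvAllowed] at hcap
          · have hm : m < house / elf := by
              simp only [pvAllowed, decide_eq_true_eq] at hcap
              omega
            have hhit : pvHit N (some m) elf house (i : Int) = false := by
              simp only [pvHit]
              by_contra hcon
              simp only [Bool.not_eq_false, Bool.and_eq_true, decide_eq_true_eq, pvAllowed] at hcon
              obtain ⟨⟨⟨hlo, hiN⟩, hmod⟩, hc⟩ := hcon
              have hmono : house / elf ≤ (i : Int) / elf := Int.ediv_le_ediv helf0 hlo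
              omega
            simp [hhit]
      · -- while condition fails: nothing changes, and no hit is possible
        rw [if_neg hle]
        have hhit : pvHit N cap elf house (i : Int) = false := by
          simp only [pvHit]
          by_contra hcon
          simp only [Bool.not_eq_false, Bool.and_eq_true, decide_eq_true_eq] at hcon
          omega
        simp [hhit]

-- the value of A's outer elf loop at every index
lemma pvOuter_getD (N : Int) (cap : Option Int) (f : Int) :
    ∀ (K : Nat) (e : Int), 1 ≤ e → (N + 1 - e).toNat ≤ K →
      ∀ (acc : List Int), acc.length = N.toNat + 1 → ∀ i : Nat,
      ((PySem.List.pyRange e (N + 1) 1).foldl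
          (fun acc elf => pvAInner N cap f elf (N.toNat + 1) elf acc) acc).getD i 0
        = acc.getD i 0
          + ((PySem.List.pyRange e (N + 1) 1).map
              (fun d => if pvHit N cap d d i then d * f else 0)).sum := by
  intro K
  induction K with
  | zero =>
      intro e he hK acc hlen i
      rw [PySem.List.pyRange_one_eq_nil (by omega)]
      simp
  | succ K ih =>
      intro e he hK acc hlen i
      by_cases hend : N + 1 ≤ e
      · rw [PySem.List.pyRange_one_eq_nil hend]; simp
      · rw [PySem.List.pyRange_one_cons (by omega)]
        simp only [List.foldl_cons, List.map_cons, List.sum_cons]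
        have hterm : N < e + ((N.toNat + 1 : Nat) : Int) * e := by
          have h1 : N ≤ (N.toNat : Int) := Int.self_le_toNat N
          have h2 : ((N.toNat + 1 : Nat) : Int) * 1 ≤ ((N.toNat + 1 : Nat) : Int) * e :=
            mul_le_mul_of_nonneg_left he (by positivity)
          push_cast at h1 h2 ⊢
          linarith
        have hlen' : (pvAInner N cap f e (N.toNat + 1) e acc).length = N.toNat + 1 := by
          rw [pvAInner_length]; exact hlen
        rw [ih (e + 1) (by omega) (by omega) _ hlen' i]
        rw [pvAInner_getD N cap f e he (N.toNat + 1) e acc Int.emod_self he hterm hlen i]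
        ring

lemma pvInit_eq (N : Int) :
    (PySem.List.pyRange 0 N 1).foldl (fun acc _ => acc ++ [(0 : Int)]) [0]
      = List.replicate (N.toNat + 1) 0 := by
  have h := PySem.List.foldl_append_singleton_eq_map (fun _ : Int => (0 : Int))
      (PySem.List.pyRange 0 N 1) [0]
  simp only at h
  rw [h, List.map_const']
  rw [PySem.List.length_pyRange_one]
  simp [List.replicate_succ]

lemma pvGetD_replicate (n i : Nat) : (List.replicate n (0 : Int)).getD i 0 = 0 := by
  unfold List.getD
  rcases h : (List.replicate n (0 : Int))[i]? with _ | x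
  · rfl
  · have hm := List.mem_of_getElem? h
    simp [List.eq_of_mem_replicate hm]

-- the ideal contribution of divisor x to house h ("x sends x*f if h/x is within the cap")
def pvT (cap : Option Int) (f h x : Int) : Int :=
  if h % x = 0 ∧ pvAllowed cap (h / x) = true then x * f else 0

-- arithmetic facts about the complementary divisor q = h / x
lemma pvDivFacts {h x : Int} (hh : 1 ≤ h) (hx1 : 1 ≤ x) (hmod : h % x = 0) :
    1 ≤ h / x ∧ h / x ≤ h ∧ h % (h / x) = 0 ∧ h / (h / x) = x ∧ x * (h / x) = h := by
  have hdvd : x ∣ h := Int.dvd_of_emod_eq_zero hmod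
  have hxq : x * (h / x) = h := Int.mul_ediv_cancel' hdvd
  have hq1 : 1 ≤ h / x := by nlinarith
  have hqd : h / x ∣ h := ⟨x, (Int.ediv_mul_cancel hdvd).symm⟩
  have hqh : h / x ≤ h := Int.le_of_dvd (by omega) hqd
  have hmq : h % (h / x) = 0 := Int.emod_eq_zero_of_dvd hqd
  have hdq : h / (h / x) = x := by
    have hcan := Int.mul_ediv_cancel x (show h / x ≠ 0 by omega)
    rw [hxq] at hcan
    exact hcan
  exact ⟨hq1, hqh, hmq, hdq, hxq⟩

-- a list sum over range(a, b) is a Finset sum over Icc a (b-1)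
lemma pvSum_Icc (g : Int → Int) (a b : Int) :
    ((PySem.List.pyRange a b 1).map g).sum = ∑ x ∈ Finset.Icc a (b - 1), g x := by
  rw [← List.sum_toFinset g (PySem.List.nodup_pyRange_one a b)]
  have hset : (PySem.List.pyRange a b 1).toFinset = Finset.Icc a (b - 1) := by
    ext x
    simp only [List.mem_toFinset, PySem.List.mem_pyRange_one, Finset.mem_Icc]
    omega
  rw [hset]

-- A's full divisor sum for a house i (1 ≤ i ≤ N), as a Finset sum of pvT
lemma pvASum (N : Int) (cap : Option Int) (f : Int) (i : Nat)
    (h1 : 1 ≤ (i : Int)) (h2 : (i : Int) ≤ N) :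
    ((PySem.List.pyRange 1 (N + 1) 1).map
        (fun d => if pvHit N cap d d i then d * f else 0)).sum
      = ∑ x ∈ Finset.Icc 1 (i : Int), pvT cap f (i : Int) x := by
  rw [PySem.List.pyRange_one_append 1 ((i : Int) + 1) (N + 1) (by omega) (by omega)]
  rw [List.map_append, List.sum_append]
  have htail : ((PySem.List.pyRange ((i : Int) + 1) (N + 1) 1).map
      (fun d => if pvHit N cap d d i then d * f else 0)).sum = 0 := by
    apply List.sum_eq_zero
    intro x hx
    obtain ⟨d, hd, rfl⟩ := List.mem_map.mp hx
    obtain ⟨hd1, hd2⟩ := PySem.List.mem_pyRange_one.mp hd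
    have hfalse : pvHit N cap d d (i : Int) = false := by
      simp only [pvHit]
      by_contra hcon
      simp only [Bool.not_eq_false, Bool.and_eq_true, decide_eq_true_eq] at hcon
      omega
    simp [hfalse]
  rw [htail, add_zero]
  clear htail
  have hmap : ((PySem.List.pyRange 1 ((i : Int) + 1) 1).map
      (fun d => if pvHit N cap d d i then d * f else 0)).sum
      = ((PySem.List.pyRange 1 ((i : Int) + 1) 1).map (pvT cap f (i : Int))).sum := by
    refine congrArg List.sum (List.map_congr_left ?_)
    intro d hd
    obtain ⟨hd1, hd2⟩ := PySem.List.mem_pyRange_one.mp hd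
    have hbool : pvHit N cap d d ((i : Nat) : Int)
        = decide (((i : Int)) % d = 0 ∧ pvAllowed cap ((i : Int) / d) = true) := by
      simp only [pvHit]
      by_cases hm : ((i : Int)) % d = 0 <;>
        by_cases hc : pvAllowed cap ((i : Int) / d) = true <;>
          simp [hm, hc, show (d : Int) ≤ (i : Int) by omega, show ((i : Int)) ≤ N by omega]
    rw [hbool]
    simp only [pvT]
    by_cases hcond : ((i : Int)) % d = 0 ∧ pvAllowed cap ((i : Int) / d) = true <;>
      simp [hcond]
  rw [hmap]
  rw [pvSum_Icc (pvT cap f (i : Int)) 1 ((i : Int) + 1)]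
  rw [show (i : Int) + 1 - 1 = (i : Int) by ring]

-- the outer fold preserves the length
lemma pvA_fold_length (N : Int) (cap : Option Int) (f : Int) :
    ∀ (l : List Int) (acc : List Int),
      (l.foldl (fun acc elf => pvAInner N cap f elf (N.toNat + 1) elf acc) acc).length
        = acc.length := by
  intro l
  induction l with
  | nil => intro acc; rfl
  | cons x xs ih => intro acc; rw [List.foldl_cons, ih, pvAInner_length]

-- ===== B-side characterization =====

-- B's init list is all zeros
lemma pvBInit_eq (N : Int) :
    ([0] ++ List.replicate N.toNat 0 : List Int) = List.replicate (N.toNat + 1) 0 := by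
  simp [List.replicate_succ]

-- the contribution of generator d to house h in Source B (both pair members, square once)
def pvG (cap : Option Int) (f h d : Int) : Int :=
  if h % d = 0 then
    (if pvAllowed cap (h / d) then d * f else 0)
      + (if h / d ≠ d ∧ pvAllowed cap d then (h / d) * f else 0)
  else 0

-- "house_presents[m] += v" at every index
lemma pvSetAdd_getD (acc : List Int) (m v : Int) (h0 : 0 ≤ m)
    (hlt : m < (acc.length : Int)) (i : Nat) :
    (PySem.List.pySetD acc m (PySem.List.pyGetD acc m 0 + v)).getD i 0
      = if (i : Int) = m then acc.getD i 0 + v else acc.getD i 0 := by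
  have hnlt : m.toNat < acc.length := by omega
  have hset : PySem.List.pySetD acc m (PySem.List.pyGetD acc m 0 + v)
      = acc.set m.toNat (acc.getD m.toNat 0 + v) := by
    rw [PySem.List.pySetD_of_nonneg acc _ h0]
    congr 1
    rw [PySem.List.pyGetD_eq_getElem acc 0 h0 hlt, List.getD_eq_getElem acc 0 hnlt]
  rw [hset, pvGetD_set acc m.toNat i _ hnlt]
  have hiff : (i = m.toNat) ↔ ((i : Int) = m) := by omega
  by_cases hi : i = m.toNat
  · rw [if_pos hi, if_pos (hiff.mp hi), hi]
  · rw [if_neg hi, if_neg (fun h => hi (hiff.mpr h))]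

lemma pvBStep_length (cap : Option Int) (f d : Int) (acc : List Int) (m : Int) :
    (pvBStep cap f d acc m).length = acc.length := by
  simp only [pvBStep]
  split_ifs <;> simp [PySem.List.length_pySetD]

-- one inner-loop body at house m touches only index m, adding exactly pvG m d there
lemma pvBStep_getD (cap : Option Int) (f d : Int) (hd : 1 ≤ d) (acc : List Int) (m : Int)
    (h0 : 0 ≤ m) (hlt : m < (acc.length : Int)) (hmod : m % d = 0) (i : Nat) :
    (pvBStep cap f d acc m).getD i 0
      = if (i : Int) = m then acc.getD i 0 + pvG cap f m d else acc.getD i 0 := by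
  have hfd : PySem.Int.floordiv m d = m / d :=
    PySem.Int.floordiv_eq_ediv_of_pos (by omega)
  have hGval : pvG cap f m d
      = (if pvAllowed cap (m / d) = true then d * f else 0)
        + (if m / d ≠ d ∧ pvAllowed cap d = true then (m / d) * f else 0) := by
    simp only [pvG]
    rw [if_pos hmod]
  simp only [pvBStep, hfd, hGval]
  by_cases hc1 : pvAllowed cap (m / d) = true
  · rw [if_pos hc1, if_pos hc1]
    by_cases hc2 : m / d ≠ d ∧ pvAllowed cap d = true
    · rw [if_pos hc2, if_pos hc2]
      have hlt1 : m < ((PySem.List.pySetD acc m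
          (PySem.List.pyGetD acc m 0 + d * f)).length : Int) := by
        rw [PySem.List.length_pySetD]; exact hlt
      rw [pvSetAdd_getD _ m ((m / d) * f) h0 hlt1 i,
        pvSetAdd_getD acc m (d * f) h0 hlt i]
      by_cases hi : (i : Int) = m
      · rw [if_pos hi, if_pos hi, if_pos hi]; ring
      · rw [if_neg hi, if_neg hi, if_neg hi]
    · rw [if_neg hc2, if_neg hc2]
      rw [pvSetAdd_getD acc m (d * f) h0 hlt i]
      by_cases hi : (i : Int) = m
      · rw [if_pos hi, if_pos hi]; ring
      · rw [if_neg hi, if_neg hi]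
  · rw [if_neg hc1, if_neg hc1]
    by_cases hc2 : m / d ≠ d ∧ pvAllowed cap d = true
    · rw [if_pos hc2, if_pos hc2]
      rw [pvSetAdd_getD acc m ((m / d) * f) h0 hlt i]
      by_cases hi : (i : Int) = m
      · rw [if_pos hi, if_pos hi]; ring
      · rw [if_neg hi, if_neg hi]
    · rw [if_neg hc2, if_neg hc2]
      by_cases hi : (i : Int) = m
      · rw [if_pos hi]; ring
      · rw [if_neg hi]

-- the value of Source B's inner for-loop over a duplicate-free list of houses
lemma pvBInner_getD (cap : Option Int) (f d : Int) (hd : 1 ≤ d) :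
    ∀ (l : List Int) (acc : List Int), l.Nodup →
      (∀ m ∈ l, 0 ≤ m ∧ m < (acc.length : Int) ∧ m % d = 0) → ∀ i : Nat,
      (l.foldl (pvBStep cap f d) acc).getD i 0
        = acc.getD i 0 + (if (i : Int) ∈ l then pvG cap f (i : Int) d else 0) := by
  intro l
  induction l with
  | nil => intro acc _ _ i; simp
  | cons m l ih =>
      intro acc hnd hmem i
      obtain ⟨h0, hlt, hmod⟩ := hmem m List.mem_cons_self
      rw [List.foldl_cons]
      rw [ih _ (List.Nodup.of_cons hnd) (fun m' hm' => by
        have h := hmem m' (List.mem_cons_of_mem _ hm')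
        rwa [pvBStep_length]) i]
      rw [pvBStep_getD cap f d hd acc m h0 hlt hmod i]
      by_cases hi : (i : Int) = m
      · have hnotin : (i : Int) ∉ l := by
          rw [hi]; exact (List.nodup_cons.mp hnd).1
        rw [if_pos hi, if_neg hnotin, add_zero, hi,
          if_pos (List.mem_cons_self)]
      · rw [if_neg hi]
        have hmemiff : ((i : Int) ∈ m :: l) ↔ ((i : Int) ∈ l) := by
          simp [List.mem_cons, hi]
        rw [if_congr hmemiff rfl rfl]

-- range(d*d, N+1, d) is duplicate-free
lemma pvNodup_pyRange_step (a b d : Int) (hd : 0 < d) :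
    (PySem.List.pyRange a b d).Nodup := by
  rw [PySem.List.pyRange_of_pos a b hd]
  refine List.Nodup.map ?_ (List.nodup_range)
  intro x y hxy
  have hxy' : a + d * (x : Int) = a + d * (y : Int) := hxy
  have hmul : d * (x : Int) = d * (y : Int) := by omega
  have := mul_left_cancel₀ (show d ≠ 0 by omega) hmul
  omega

-- the value of Source B's outer while loop at every index i ≤ N
lemma pvBOuter_getD (N : Int) (cap : Option Int) (f : Int) :
    ∀ (fuel : Nat) (d : Int) (acc : List Int), 1 ≤ d → N < d + (fuel : Int) →
      acc.length = N.toNat + 1 → ∀ i : Nat, (i : Int) ≤ N →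
      (pvBOuter N cap f fuel d acc).getD i 0
        = acc.getD i 0
          + ∑ j ∈ (Finset.Icc d (i : Int)).filter (fun j => j * j ≤ (i : Int)),
              pvG cap f (i : Int) j := by
  intro fuel
  induction fuel with
  | zero =>
      intro d acc hd hfuel hlen i hiN
      have hd' : N < d := by push_cast at hfuel; omega
      have hempty : (Finset.Icc d (i : Int)).filter (fun j => j * j ≤ (i : Int)) = ∅ := by
        apply Finset.filter_eq_empty_iff.mpr
        intro j hj
        simp only [Finset.mem_Icc] at hj
        intro _
        omega
      simp [pvBOuter, hempty]
  | succ fuel ih =>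
      intro d acc hd hfuel hlen i hiN
      simp only [pvBOuter]
      by_cases hdd : d * d ≤ N
      · rw [if_pos hdd]
        have hmem : ∀ m ∈ PySem.List.pyRange (d * d) (N + 1) d,
            0 ≤ m ∧ m < (acc.length : Int) ∧ m % d = 0 := by
          intro m hm
          obtain ⟨hm1, hm2, hm3⟩ := (PySem.List.mem_pyRange_iff_of_pos (by omega) m).mp hm
          have hdvd : d ∣ m := by
            have hsub : d ∣ m - d * d := hm3
            have hsq : d ∣ d * d := Dvd.intro d rfl
            have hm : m = (m - d * d) + d * d := by ring
            rw [hm]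
            exact dvd_add hsub hsq
          refine ⟨by nlinarith, by rw [hlen]; push_cast; omega,
            Int.emod_eq_zero_of_dvd hdvd⟩
        have hlen' : ((PySem.List.pyRange (d * d) (N + 1) d).foldl
            (pvBStep cap f d) acc).length = N.toNat + 1 := by
          have : ∀ (l : List Int) (a : List Int),
              (l.foldl (pvBStep cap f d) a).length = a.length := by
            intro l
            induction l with
            | nil => intro a; rfl
            | cons x xs ihl => intro a; rw [List.foldl_cons, ihl, pvBStep_length]
          rw [this, hlen]
        rw [ih (d + 1) _ (by omega) (by push_cast at hfuel ⊢; omega) hlen' i hiN]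
        rw [pvBInner_getD cap f d hd _ acc
          (pvNodup_pyRange_step (d * d) (N + 1) d (by omega)) hmem i]
        have hmemiff : ((i : Int) ∈ PySem.List.pyRange (d * d) (N + 1) d)
            ↔ (d * d ≤ (i : Int) ∧ d ∣ (i : Int)) := by
          rw [PySem.List.mem_pyRange_iff_of_pos (by omega)]
          constructor
          · rintro ⟨h1, h2, h3⟩
            have hsq : d ∣ d * d := Dvd.intro d rfl
            refine ⟨h1, ?_⟩
            have hm : (i : Int) = ((i : Int) - d * d) + d * d := by ring
            rw [hm]
            exact dvd_add h3 hsq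
          · rintro ⟨h1, h2⟩
            have hsq : d ∣ d * d := Dvd.intro d rfl
            exact ⟨h1, by omega, dvd_sub h2 hsq⟩
        by_cases hsmall : d * d ≤ (i : Int)
        · have hdi : d ≤ (i : Int) := by nlinarith
          have hsplit : (Finset.Icc d (i : Int)).filter (fun j => j * j ≤ (i : Int))
              = insert d ((Finset.Icc (d + 1) (i : Int)).filter
                  (fun j => j * j ≤ (i : Int))) := by
            ext j
            simp only [Finset.mem_insert, Finset.mem_filter, Finset.mem_Icc]
            constructor
            · rintro ⟨⟨hj1, hj2⟩, hj3⟩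
              rcases eq_or_ne j d with rfl | hne
              · exact Or.inl rfl
              · exact Or.inr ⟨⟨by omega, hj2⟩, hj3⟩
            · rintro (rfl | ⟨⟨hj1, hj2⟩, hj3⟩)
              · exact ⟨⟨le_refl _, hdi⟩, hsmall⟩
              · exact ⟨⟨by omega, hj2⟩, hj3⟩
          rw [hsplit, Finset.sum_insert (by
            simp only [Finset.mem_filter, Finset.mem_Icc]
            omega)]
          by_cases hdvd : d ∣ (i : Int)
          · rw [if_pos (hmemiff.mpr ⟨hsmall, hdvd⟩)]
            ring
          · rw [if_neg (fun h => hdvd (hmemiff.mp h).2)]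
            have hG0 : pvG cap f (i : Int) d = 0 := by
              have : ¬ ((i : Int) % d = 0) := fun h =>
                hdvd (Int.dvd_of_emod_eq_zero h)
              simp [pvG, this]
            rw [hG0]
            ring
        · have hnot : ((i : Int)) ∉ PySem.List.pyRange (d * d) (N + 1) d :=
            fun h => hsmall (hmemiff.mp h).1
          rw [if_neg hnot, add_zero]
          have hsame : (Finset.Icc d (i : Int)).filter (fun j => j * j ≤ (i : Int))
              = (Finset.Icc (d + 1) (i : Int)).filter (fun j => j * j ≤ (i : Int)) := by
            ext j
            simp only [Finset.mem_filter, Finset.mem_Icc]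
            constructor
            · rintro ⟨⟨hj1, hj2⟩, hj3⟩
              rcases eq_or_ne j d with rfl | hne
              · exact absurd hj3 hsmall
              · exact ⟨⟨by omega, hj2⟩, hj3⟩
            · rintro ⟨⟨hj1, hj2⟩, hj3⟩
              exact ⟨⟨by omega, hj2⟩, hj3⟩
          rw [hsame]
      · rw [if_neg hdd]
        have hempty : (Finset.Icc d (i : Int)).filter (fun j => j * j ≤ (i : Int)) = ∅ := by
          apply Finset.filter_eq_empty_iff.mpr
          intro j hj
          simp only [Finset.mem_Icc] at hj
          intro hjj
          nlinarith
        simp [hempty]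

-- the sqrt-pair contributions pvG over small generators are the full divisor sum ∑ pvT:
-- the second pair member reflects, via d ↦ h/d, onto the divisors above sqrt(h)
lemma pvSmallPair_eq (cap : Option Int) (f h : Int) (hh : 1 ≤ h) :
    ∑ j ∈ (Finset.Icc 1 h).filter (fun j => j * j ≤ h), pvG cap f h j
      = ∑ x ∈ Finset.Icc 1 h, pvT cap f h x := by
  -- split the target over small (x*x ≤ h) and large divisors
  rw [← Finset.sum_filter_add_sum_filter_not (Finset.Icc 1 h) (fun j => j * j ≤ h)
      (pvT cap f h)]
  -- pvG = pvT + second-member contribution, pointwise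
  have hG : ∀ j ∈ (Finset.Icc 1 h).filter (fun j => j * j ≤ h),
      pvG cap f h j = pvT cap f h j
        + (if h % j = 0 ∧ h / j ≠ j then (if pvAllowed cap j then (h / j) * f else 0) else 0) := by
    intro j _
    simp only [pvG, pvT]
    by_cases hm : h % j = 0
    · by_cases hc : pvAllowed cap (h / j) = true
      · simp only [hm, hc, and_self, if_true, true_and]
        by_cases hne : h / j ≠ j <;> simp [hne]
      · simp only [hm, hc, true_and]
        by_cases hne : h / j ≠ j <;> simp [hne]
    · simp [hm]
  rw [Finset.sum_congr rfl hG, Finset.sum_add_distrib]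
  congr 1
  -- second members over small strict divisors = pvT over large divisors, by d ↦ h/d
  rw [← Finset.sum_filter ]
  rw [Finset.filter_filter]
  have hlarge : ∑ x ∈ (Finset.Icc 1 h).filter (fun j => ¬ j * j ≤ h), pvT cap f h x
      = ∑ x ∈ (Finset.Icc 1 h).filter (fun x => ¬ x * x ≤ h ∧ h % x = 0),
          (if pvAllowed cap (h / x) then x * f else 0) := by
    rw [← Finset.sum_filter_add_sum_filter_not
        ((Finset.Icc 1 h).filter (fun j => ¬ j * j ≤ h)) (fun x => h % x = 0)
        (pvT cap f h), Finset.filter_filter]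
    have hz : ∑ x ∈ (Finset.Icc 1 h).filter (fun j => ¬ j * j ≤ h) |>.filter
        (fun x => ¬ h % x = 0), pvT cap f h x = 0 := by
      apply Finset.sum_eq_zero
      intro x hx
      simp only [Finset.mem_filter] at hx
      simp [pvT, hx.2]
    rw [hz, add_zero]
    apply Finset.sum_congr rfl
    intro x hx
    simp only [Finset.mem_filter] at hx
    simp [pvT, hx.2.2]
  rw [hlarge]
  symm
  apply Finset.sum_nbij' (fun x => h / x) (fun d => h / d)
  · -- large divisor x goes to a small strict divisor h/x
    intro x hx
    simp only [Finset.mem_filter, Finset.mem_Icc] at hx ⊢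
    obtain ⟨⟨hx1, hxh⟩, hbig, hmod⟩ := hx
    obtain ⟨hq1, hqh, hmq, hdq, hxq⟩ := pvDivFacts hh hx1 hmod
    have hqx : h / x < x := by nlinarith
    refine ⟨⟨hq1, hqh⟩, by nlinarith, hmq, ?_⟩
    rw [hdq]; omega
  · -- small strict divisor d goes to a large divisor h/d
    intro d hd
    simp only [Finset.mem_filter, Finset.mem_Icc] at hd ⊢
    obtain ⟨⟨hd1, hdh⟩, hsmall, hmod, hne⟩ := hd
    obtain ⟨hq1, hqh, hmq, hdq, hxq⟩ := pvDivFacts hh hd1 hmod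
    have hdq' : d < h / d := by
      rcases lt_or_ge d (h / d) with hlt | hge
      · exact hlt
      · exfalso; apply hne; nlinarith
    refine ⟨⟨hq1, hqh⟩, by nlinarith, hmq⟩
  · intro x hx
    simp only [Finset.mem_filter, Finset.mem_Icc] at hx
    exact (pvDivFacts hh hx.1.1 hx.2.2).2.2.2.1
  · intro d hd
    simp only [Finset.mem_filter, Finset.mem_Icc] at hd
    exact (pvDivFacts hh hd.1.1 hd.2.2.1).2.2.2.1
  · intro x hx
    simp only [Finset.mem_filter, Finset.mem_Icc] at hx
    obtain ⟨⟨hx1, hxh⟩, hbig, hmod⟩ := hx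
    rw [(pvDivFacts hh hx1 hmod).2.2.2.1]

-- ===== VERDICT (by name: the statement is the Claim_ definition above) =====
theorem first_n_house_presents_spec : Claim_equal_first_n_house_presents := by
  intro N cap f _
  unfold Spec_first_n_house_presents
  by_cases hN : N < 0
  · unfold first_n_house_presents first_n_house_presents_alt
    rw [PySem.List.pyRange_one_eq_nil (show N + 1 ≤ 1 by omega),
      PySem.List.pyRange_one_eq_nil (show N ≤ 0 by omega)]
    have ht : N.toNat = 0 := by omega
    rw [ht]
    simp only [pvBOuter]
    rw [if_neg (show ¬ ((1 : Int) * 1 ≤ N) by omega)]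
    simp
  · replace hN : 0 ≤ N := by omega
    have hlenBfold : ∀ (fuel : Nat) (d : Int) (acc : List Int),
        (pvBOuter N cap f fuel d acc).length = acc.length := by
      intro fuel
      induction fuel with
      | zero => intro d acc; rfl
      | succ fuel ih =>
          intro d acc
          simp only [pvBOuter]
          split_ifs
          · rw [ih]
            have : ∀ (l : List Int) (a : List Int),
                (l.foldl (pvBStep cap f d) a).length = a.length := by
              intro l
              induction l with
              | nil => intro a; rfl
              | cons x xs ihl => intro a; rw [List.foldl_cons, ihl, pvBStep_length]
            rw [this]
          · rfl
    have hlenA : (first_n_house_presents N cap f).length = N.toNat + 1 := by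
      unfold first_n_house_presents
      rw [pvA_fold_length, pvInit_eq, List.length_replicate]
    have hlenB : (first_n_house_presents_alt N cap f).length = N.toNat + 1 := by
      unfold first_n_house_presents_alt
      rw [hlenBfold, pvBInit_eq, List.length_replicate]
    apply List.ext_getElem (by rw [hlenA, hlenB])
    intro i hi1 hi2
    have hiN : (i : Int) ≤ N := by
      rw [hlenA] at hi1
      omega
    have hAval : (first_n_house_presents N cap f)[i]
        = ((PySem.List.pyRange 1 (N + 1) 1).map
            (fun d => if pvHit N cap d d i then d * f else 0)).sum := by
      rw [← List.getD_eq_getElem _ 0 hi1]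
      unfold first_n_house_presents
      rw [pvInit_eq]
      rw [pvOuter_getD N cap f N.toNat 1 le_rfl (by omega) _ (List.length_replicate) i]
      rw [pvGetD_replicate, zero_add]
    have hBval : (first_n_house_presents_alt N cap f)[i]
        = ∑ j ∈ (Finset.Icc 1 (i : Int)).filter (fun j => j * j ≤ (i : Int)),
            pvG cap f (i : Int) j := by
      rw [← List.getD_eq_getElem _ 0 hi2]
      unfold first_n_house_presents_alt
      rw [pvBInit_eq]
      rw [pvBOuter_getD N cap f (N.toNat + 1) 1 _ le_rfl (by push_cast; omega)
        (List.length_replicate) i hiN]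
      rw [pvGetD_replicate, zero_add]
    rcases Nat.eq_zero_or_pos i with rfl | hip
    · -- house 0: A's sum is empty, and B never touches index 0
      have hA0 : ((PySem.List.pyRange 1 (N + 1) 1).map
          (fun d => if pvHit N cap d d (0 : Nat) then d * f else 0)).sum = 0 := by
        apply List.sum_eq_zero
        intro x hx
        obtain ⟨d, hd, rfl⟩ := List.mem_map.mp hx
        obtain ⟨hd1, hd2⟩ := PySem.List.mem_pyRange_one.mp hd
        have hfalse : pvHit N cap d d (0 : Int) = false := by
          simp only [pvHit]
          by_contra hcon
          simp only [Bool.not_eq_false, Bool.and_eq_true, decide_eq_true_eq] at hcon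
          omega
        simp [hfalse]
      have hB0 : (Finset.Icc (1 : Int) ((0 : Nat) : Int)).filter
          (fun j => j * j ≤ ((0 : Nat) : Int)) = ∅ := by
        apply Finset.filter_eq_empty_iff.mpr
        intro j hj
        simp only [Finset.mem_Icc] at hj
        intro _
        omega
      rw [hAval, hA0, hBval, hB0, Finset.sum_empty]
    · -- house i ≥ 1: both sides are the full divisor sum ∑ pvT
      have h1 : 1 ≤ (i : Int) := by omega
      rw [hAval, hBval, pvASum N cap f i h1 hiN, pvSmallPair_eq cap f (i : Int) h1]
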